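-- pv_equiv track=rewrite | github.com/aloeliger/anomalyDetection | CICADATraining_2025/scripts/trainingPlots_2025/src/utils.py | filter_technical_triggers
-- ===== SOURCE A (Python) =====
-- def filter_technical_triggers(list_of_triggers):
--     technical_trigger_words = [
--         'First',
--         'Bunch',
--         'Train',
--         'Orbit',
--         'Always',
--     ]
--     def doesnt_contain_technical_trigger_word(x):
--         for word in technical_trigger_words:
--             if word in x:
--                 return False
--         return True
--
--     filtered_list = filter(doesnt_contain_technical_trigger_word, list_of_triggers)
--
--     return list(filtered_list)
-- ===== SOURCE B (Python) =====
-- def filter_technical_triggers(list_of_triggers):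
--     # The five technical words all start with different letters, so a single
--     # left-to-right scan of each trigger with a first-letter dispatch table
--     # decides containment without testing every word against every trigger.
--     by_first_letter = {
--         'F': 'First',
--         'B': 'Bunch',
--         'T': 'Train',
--         'O': 'Orbit',
--         'A': 'Always',
--     }
--     def is_clean(trigger):
--         for i, c in enumerate(trigger):
--             word = by_first_letter.get(c)
--             if word is not None and trigger.startswith(word, i):
--                 return False
--         return True
--     return [t for t in list_of_triggers if is_clean(t)]
-- ===== Notes on version B (the rewrite author's own statement) =====
-- stated objective: alternative
-- what changed: Replaces A's filter() with a per-word substring test against each trigger by a single left-to-right scan of each trigger that dispatches on the current character through a first-letter dict (the five technical words start with distinct letters) and tests the one candidate word in place.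
import Mathlib
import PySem

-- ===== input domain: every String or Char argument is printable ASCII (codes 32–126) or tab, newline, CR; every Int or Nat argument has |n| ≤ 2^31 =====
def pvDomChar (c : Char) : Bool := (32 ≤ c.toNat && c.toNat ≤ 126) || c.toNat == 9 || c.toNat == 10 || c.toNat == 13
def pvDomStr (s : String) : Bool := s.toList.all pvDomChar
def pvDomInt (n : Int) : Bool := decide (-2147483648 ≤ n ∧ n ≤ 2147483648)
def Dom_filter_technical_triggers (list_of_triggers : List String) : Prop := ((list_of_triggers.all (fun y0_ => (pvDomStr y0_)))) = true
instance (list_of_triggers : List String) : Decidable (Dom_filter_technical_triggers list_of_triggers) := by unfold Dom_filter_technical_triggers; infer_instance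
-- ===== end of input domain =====

-- B replaces A's per-word 'in' membership loop by a single left-to-right scan of each trigger
-- that dispatches on the first letter through a dict (the five words start with distinct letters);
-- objective: alternative (same asymptotic cost, one positional scan instead of five substring searches).


-- ===== PORT A =====
-- the literal word list of A
def pvTechWordsA : List String := ["First", "Bunch", "Train", "Orbit", "Always"]

-- A's inner helper: for word in words: if word in x: return False; return True
def pvDoesntContainLoop (words : List String) (x : String) : Bool :=
  match words with
  | [] => true
  | w :: ws => if PySem.Str.isIn w x then false else pvDoesntContainLoop ws x

def filter_technical_triggers (list_of_triggers : List String) : List String :=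
  list_of_triggers.filter (fun x => pvDoesntContainLoop pvTechWordsA x)

-- ===== PORT B =====
-- B's dispatch table: first letter -> the one technical word starting with it
def pvByFirst : PySem.Dict Char String :=
  PySem.Dict.ofList [('F', "First"), ('B', "Bunch"), ('T', "Train"), ('O', "Orbit"), ('A', "Always")]

-- B's is_clean: scan the trigger once; at each position look the character up in the table and,
-- on a hit, test the word there.  Python's trigger.startswith(word, i) with i ≤ len(trigger)
-- is exactly Chars.startswith on the suffix from i, so the enumerate loop is this suffix recursion.
def pvIsClean : List Char → Bool
  | [] => true
  | c :: rest =>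
      match PySem.Dict.get? pvByFirst c with
      | some w => if PySem.Chars.startswith (c :: rest) w.toList then false else pvIsClean rest
      | none => pvIsClean rest

def filter_technical_triggers_alt (list_of_triggers : List String) : List String :=
  list_of_triggers.filter (fun t => pvIsClean t.toList)

-- ===== PRECONDITION & SPEC =====
def Spec_filter_technical_triggers (list_of_triggers : List String) (out : List String) : Prop := out = filter_technical_triggers_alt list_of_triggers
instance (list_of_triggers : List String) (out : List String) : Decidable (Spec_filter_technical_triggers list_of_triggers out) := by unfold Spec_filter_technical_triggers; infer_instance

-- ===== CLAIM (what is proved, stated in full; the proofs are below) =====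
def Claim_equal_filter_technical_triggers : Prop := ∀ (list_of_triggers : List String), Dom_filter_technical_triggers list_of_triggers → Spec_filter_technical_triggers list_of_triggers (filter_technical_triggers list_of_triggers)

-- ===== LEMMAS AND PROOFS =====

-- A's word loop returns true iff no word is a substring
theorem pvDoesntContainLoop_eq (words : List String) (x : String) :
    pvDoesntContainLoop words x = !(words.any (fun w => PySem.Str.isIn w x)) := by
  induction words with
  | nil => rfl
  | cons w ws ih =>
      rw [pvDoesntContainLoop, List.any_cons]
      rcases PySem.Str.isIn w x with _ | _
      · rw [if_neg (by simp), ih]; simp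
      · rw [if_pos (by simp)]; simp

-- any distributes over a pointwise disjunction of predicates
theorem pvAny_or {α : Type} (l : List α) (p q : α → Bool) :
    (l.any p || l.any q) = l.any (fun x => p x || q x) := by
  induction l with
  | nil => rfl
  | cons a t ih =>
      simp only [List.any_cons, ← ih]
      simp [Bool.or_left_comm, Bool.or_assoc]

-- substring test unfolds one character: infix of c::rest ↔ prefix of c::rest ∨ infix of rest
theorem pvIsIn_cons (w : List Char) (c : Char) (rest : List Char) :
    PySem.Chars.isIn w (c :: rest)
      = (PySem.Chars.startswith (c :: rest) w || PySem.Chars.isIn w rest) := by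
  refine Bool.eq_iff_iff.mpr ?_
  rw [PySem.Chars.isIn_iff_infix, Bool.or_eq_true, PySem.Chars.startswith_iff,
    PySem.Chars.isIn_iff_infix, List.infix_cons_iff]

-- the first-letter dispatch finds a word starting at this position iff some word starts here
theorem pvDispatch (c : Char) (rest : List Char) :
    (match PySem.Dict.get? pvByFirst c with
     | some w => PySem.Chars.startswith (c :: rest) w.toList
     | none => false)
    = pvTechWordsA.any (fun w => PySem.Chars.startswith (c :: rest) w.toList) := by
  by_cases hF : c = 'F'
  · subst hF
    simp [show PySem.Dict.get? pvByFirst 'F' = some "First" from by decide,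
      pvTechWordsA, PySem.Chars.startswith, List.isPrefixOf]
  by_cases hB : c = 'B'
  · subst hB
    simp [show PySem.Dict.get? pvByFirst 'B' = some "Bunch" from by decide,
      pvTechWordsA, PySem.Chars.startswith, List.isPrefixOf]
  by_cases hT : c = 'T'
  · subst hT
    simp [show PySem.Dict.get? pvByFirst 'T' = some "Train" from by decide,
      pvTechWordsA, PySem.Chars.startswith, List.isPrefixOf]
  by_cases hO : c = 'O'
  · subst hO
    simp [show PySem.Dict.get? pvByFirst 'O' = some "Orbit" from by decide,
      pvTechWordsA, PySem.Chars.startswith, List.isPrefixOf]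
  by_cases hA : c = 'A'
  · subst hA
    simp [show PySem.Dict.get? pvByFirst 'A' = some "Always" from by decide,
      pvTechWordsA, PySem.Chars.startswith, List.isPrefixOf]
  · have e : pvByFirst.items
        = [('F', "First"), ('B', "Bunch"), ('T', "Train"), ('O', "Orbit"), ('A', "Always")] := by
      decide
    have f1 : ('F' == c) = false := by simp [Ne.symm hF]
    have f2 : ('B' == c) = false := by simp [Ne.symm hB]
    have f3 : ('T' == c) = false := by simp [Ne.symm hT]
    have f4 : ('O' == c) = false := by simp [Ne.symm hO]
    have f5 : ('A' == c) = false := by simp [Ne.symm hA]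
    simp [PySem.Dict.get?, e, List.find?, pvTechWordsA, PySem.Chars.startswith,
      List.isPrefixOf, f1, f2, f3, f4, f5]

-- B's scan clears a trigger iff no technical word is a substring of it
theorem pvIsClean_eq (s : List Char) :
    pvIsClean s = !(pvTechWordsA.any (fun w => PySem.Chars.isIn w.toList s)) := by
  induction s with
  | nil => decide
  | cons c rest ih =>
      have hd := pvDispatch c rest
      have hr : pvTechWordsA.any (fun w => PySem.Chars.isIn w.toList (c :: rest))
          = (pvTechWordsA.any (fun w => PySem.Chars.startswith (c :: rest) w.toList)
             || pvTechWordsA.any (fun w => PySem.Chars.isIn w.toList rest)) := by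
        rw [pvAny_or]
        exact PySem.List.any_congr_mem (fun w _ => pvIsIn_cons w.toList c rest)
      cases hq : PySem.Dict.get? pvByFirst c with
      | none =>
          rw [hq] at hd
          simp only [pvIsClean, hq, ih, hr, ← hd]
          simp
      | some w =>
          rw [hq] at hd
          simp only [pvIsClean, hq, ih, hr, ← hd]
          cases hsw : PySem.Chars.startswith (c :: rest) w.toList <;> simp

-- the two per-trigger tests agree
theorem pvTest_eq (x : String) :
    pvDoesntContainLoop pvTechWordsA x = pvIsClean x.toList := by
  rw [pvDoesntContainLoop_eq, pvIsClean_eq]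
  simp only [PySem.Str.isIn_eq]

-- ===== VERDICT (by name: the statement is the Claim_ definition above) =====
theorem filter_technical_triggers_spec : Claim_equal_filter_technical_triggers := by
  intro l _
  unfold Spec_filter_technical_triggers filter_technical_triggers filter_technical_triggers_alt
  exact List.filter_congr (fun x _ => pvTest_eq x)
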